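-- pv_equiv track=rewrite | github.com/encord-team/encord-consensus | encord_consensus/lib/frame_label_consensus.py | process_vote_counts
-- ===== SOURCE A (Python) =====
-- import itertools
-- from collections import Counter, defaultdict
-- from typing import DefaultDict, Dict, List
--
-- def process_vote_counts(number_of_annotators_agreeing) -> Dict[int, int]:
--     max_number_of_annotators_agreeing = max(number_of_annotators_agreeing, default=0)
--     agreements_count_exact = [0] * (max_number_of_annotators_agreeing + 1)
--     for annotators_amount, agreement_count in Counter(number_of_annotators_agreeing).items():
--         agreements_count_exact[annotators_amount] = agreement_count
--     agreement_count_ge = list(reversed(list(itertools.accumulate(reversed(agreements_count_exact)))))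
--
--     return {
--         annotators_amount: agreement_count_ge
--         for annotators_amount, agreement_count_ge in enumerate(agreement_count_ge, start=1)
--     }
-- ===== SOURCE B (Python) =====
-- def process_vote_counts(number_of_annotators_agreeing):
--     s = sorted(number_of_annotators_agreeing)
--     mx = s[-1] if s else 0
--     n = len(s)
--     result = {}
--     i = 0
--     for j in range(mx + 1):
--         while i < n and s[i] < j:
--             i += 1
--         result[j + 1] = n - i
--     return result
-- ===== Notes on version B (the rewrite author's own statement) =====
-- stated objective: alternative
-- what changed: Replaces the Counter -> count-array -> reversed-accumulate suffix-sum pipeline with a single sort followed by one two-pointer sweep over thresholds, counting elements >= j directly from the sorted list.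
-- outside the precondition, e.g. on process_vote_counts([-2, 1]): A returns {1: 2, 2: 1}, B returns {1: 1, 2: 1}; on process_vote_counts([-3]): A raises IndexError, B returns {}
import Mathlib
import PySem

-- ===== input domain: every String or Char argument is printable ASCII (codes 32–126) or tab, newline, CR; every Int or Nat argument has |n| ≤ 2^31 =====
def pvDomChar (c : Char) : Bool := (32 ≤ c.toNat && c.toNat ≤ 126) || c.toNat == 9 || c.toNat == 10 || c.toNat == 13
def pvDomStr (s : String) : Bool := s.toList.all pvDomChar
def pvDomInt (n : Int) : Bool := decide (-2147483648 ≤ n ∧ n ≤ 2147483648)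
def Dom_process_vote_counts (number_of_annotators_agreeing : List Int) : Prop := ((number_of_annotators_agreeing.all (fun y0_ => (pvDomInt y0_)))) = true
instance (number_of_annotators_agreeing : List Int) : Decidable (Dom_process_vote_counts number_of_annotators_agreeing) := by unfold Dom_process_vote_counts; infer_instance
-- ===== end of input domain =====

-- B replaces A's Counter/count-array/suffix-accumulate pipeline by one sorted sweep; same outputs on the natural (non-negative) domain.

-- ===== PORT A =====
-- Python list assignment a[i] = v (negative index wraps; out of range raises — such inputs are outside Pre_).
def pySetAt (a : List Int) (i v : Int) : List Int :=
  let i' := if i < 0 then i + a.length else i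
  if 0 ≤ i' ∧ i' < (a.length : Int) then a.set i'.toNat v else a

-- itertools.accumulate (running sum, ported by hand; exact for operator +)
def pvAccum : Int → List Int → List Int
  | _, [] => []
  | s, x :: xs => (s + x) :: pvAccum (s + x) xs

def process_vote_counts (number_of_annotators_agreeing : List Int) : List (Int × Int) :=
  let mx : Int := match PySem.List.max? number_of_annotators_agreeing (fun x => x) with
    | some m => m
    | none => 0
  let arr0 : List Int := List.replicate (mx + 1).toNat 0
  let arr := (PySem.Dict.counter number_of_annotators_agreeing).items.foldl
      (fun a kc => pySetAt a kc.1 kc.2) arr0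
  let ge := (pvAccum 0 arr.reverse).reverse
  -- dict comprehension over enumerate(ge, start=1): keys are distinct, so the dict is this association list
  PySem.List.enumerate ge 1

-- ===== PORT B =====
-- the while-loop advancing the pointer over the sorted list: drop leading elements < j
def pvDropLt (j : Int) : List Int → List Int
  | [] => []
  | x :: xs => if x < j then pvDropLt j xs else x :: xs

def process_vote_counts_alt (number_of_annotators_agreeing : List Int) : List (Int × Int) :=
  let s := PySem.List.sorted number_of_annotators_agreeing (fun x => x) false
  let mx : Int := match PySem.List.pyGet? s (-1) with  -- s[-1] if s else 0
    | some m => m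
    | none => 0
  ((PySem.List.pyRange 0 (mx + 1) 1).foldl
      (fun (st : List Int × List (Int × Int)) j =>
        let t := pvDropLt j st.1
        (t, st.2 ++ [(j + 1, (t.length : Int))]))
      (s, [])).2

-- ===== PRECONDITION & SPEC =====
-- Pre_ restricts to the natural domain (counts of agreeing annotators are non-negative): on lists with a
-- negative element A either raises IndexError or returns counts corrupted by negative-index wraparound.
def Pre_process_vote_counts (number_of_annotators_agreeing : List Int) : Prop :=
  ∀ x ∈ number_of_annotators_agreeing, 0 ≤ x
instance (number_of_annotators_agreeing : List Int) : Decidable (Pre_process_vote_counts number_of_annotators_agreeing) := by unfold Pre_process_vote_counts; infer_instance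
def pvWitness_process_vote_counts : List Int := [1, 3, 3, 2]

def Spec_process_vote_counts (number_of_annotators_agreeing : List Int) (out : List (Int × Int)) : Prop := out = process_vote_counts_alt number_of_annotators_agreeing
instance (number_of_annotators_agreeing : List Int) (out : List (Int × Int)) : Decidable (Spec_process_vote_counts number_of_annotators_agreeing out) := by unfold Spec_process_vote_counts; infer_instance

-- ===== CLAIM (what is proved, stated in full; the proofs are below) =====
def Claim_equal_process_vote_counts : Prop := ∀ (number_of_annotators_agreeing : List Int), Dom_process_vote_counts number_of_annotators_agreeing → Pre_process_vote_counts number_of_annotators_agreeing → Spec_process_vote_counts number_of_annotators_agreeing (process_vote_counts number_of_annotators_agreeing)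

-- ===== LEMMAS AND PROOFS =====

-- the common canonical form: thresholds 1..mx+1 with the count of elements ≥ threshold-1
def pvMxA (l : List Int) : Int :=
  match PySem.List.max? l (fun x => x) with
  | some m => m
  | none => 0

def pvCanon (l : List Int) : List (Int × Int) :=
  (List.range (pvMxA l + 1).toNat).map
    (fun k : Nat => ((k : Int) + 1, (l.countP (fun x => decide ((k : Int) ≤ x)) : Int)))

lemma pvMxA_isMax (l : List Int) : ∀ x ∈ l, x ≤ pvMxA l := by
  intro x hx
  unfold pvMxA
  cases hm : PySem.List.max? l (fun x => x) with
  | none => rw [PySem.List.max?_eq_none_iff] at hm; simp [hm] at hx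
  | some m => exact PySem.List.max?_isMax hm x hx

lemma pvMxA_nonneg (l : List Int) (hpre : ∀ x ∈ l, 0 ≤ x) : 0 ≤ pvMxA l := by
  unfold pvMxA
  cases hm : PySem.List.max? l (fun x => x) with
  | none => exact le_refl 0
  | some m => exact hpre m (PySem.List.max?_mem hm)

-- ---------- counting lemmas ----------

lemma pv_countP_empty (l : List Int) (c d : Int) (h : d ≤ c) :
    l.countP (fun x => decide (c ≤ x) && decide (x < d)) = 0 := by
  rw [List.countP_eq_zero]
  intro x _
  simp only [Bool.and_eq_true, decide_eq_true_eq]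
  omega

lemma pv_countP_split (l : List Int) (c d : Int) (h : c < d) :
    l.countP (fun x => decide (c ≤ x) && decide (x < d))
      = l.count c + l.countP (fun x => decide (c + 1 ≤ x) && decide (x < d)) := by
  induction l with
  | nil => rfl
  | cons x l ih =>
    simp only [List.countP_cons, List.count_cons, ih, beq_iff_eq,
      Bool.and_eq_true, decide_eq_true_eq]
    split_ifs <;> omega

lemma pv_countP_drop_ub (l : List Int) (c d : Int) (hub : ∀ x ∈ l, x < d) :
    l.countP (fun x => decide (c ≤ x) && decide (x < d))
      = l.countP (fun x => decide (c ≤ x)) := by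
  apply List.countP_congr
  intro x hx
  have hd := hub x hx
  simp only [Bool.and_eq_true, decide_eq_true_eq]
  exact ⟨fun h => h.1, fun h => ⟨h, hd⟩⟩

-- sum of the exact-count array over [c, c+n) is the count of elements in that window
lemma pv_sum_counts (l : List Int) :
    ∀ (n : Nat) (c : Int),
      ((List.range n).map (fun k : Nat => (l.count (c + (k : Int)) : Int))).sum
        = (l.countP (fun x => decide (c ≤ x) && decide (x < c + (n : Int))) : Int) := by
  intro n
  induction n with
  | zero =>
    intro c
    simp [pv_countP_empty l c c (le_refl c)]
  | succ n ih =>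
    intro c
    rw [List.range_succ_eq_map]
    simp only [List.map_cons, List.map_map, List.sum_cons]
    have hmap : (List.range n).map ((fun k : Nat => (l.count (c + (k : Int)) : Int)) ∘ Nat.succ)
        = (List.range n).map (fun k : Nat => (l.count ((c + 1) + (k : Int)) : Int)) := by
      apply List.map_congr_left
      intro k _
      simp only [Function.comp]
      congr 1
      push_cast
      ring_nf
    rw [hmap, ih (c + 1)]
    rw [pv_countP_split l c (c + (n + 1 : Nat)) (by push_cast; omega)]
    push_cast
    ring_nf

-- ---------- A-side: the write loop fills the exact-count array ----------

lemma pv_length_pySetAt (a : List Int) (i v : Int) : (pySetAt a i v).length = a.length := by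
  unfold pySetAt
  dsimp only
  split_ifs <;> simp

lemma pv_getElem?_foldl_setAt (f : Int → Int) :
    ∀ (ks : List Int) (a : List Int) (j : Nat),
      (∀ k ∈ ks, 0 ≤ k ∧ k < (a.length : Int)) →
      (ks.foldl (fun acc k => pySetAt acc k (f k)) a)[j]?
        = if (j : Int) ∈ ks then some (f (j : Int)) else a[j]? := by
  intro ks
  induction ks with
  | nil => intro a j _; simp
  | cons k ks ih =>
    intro a j hks
    have hk := hks k (List.mem_cons_self)
    have hset : pySetAt a k (f k) = a.set k.toNat (f k) := by
      unfold pySetAt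
      dsimp only
      have h1 : ¬ (k < 0) := by omega
      rw [if_neg h1, if_pos ⟨hk.1, hk.2⟩]
    rw [List.foldl_cons, ih (pySetAt a k (f k)) j
      (by intro k' hk'; rw [pv_length_pySetAt]; exact hks k' (List.mem_cons_of_mem _ hk'))]
    by_cases hmem : (j : Int) ∈ ks
    · simp [hmem]
    · rw [hset, List.getElem?_set]
      by_cases hkj : k = (j : Int)
      · have hkt : k.toNat = j := by omega
        have hjl : j < a.length := by omega
        simp [hkj, hmem, hjl]
      · have hkt : k.toNat ≠ j := by omega
        have : ¬ ((j : Int) ∈ k :: ks) := by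
          intro hc
          rcases List.mem_cons.mp hc with h | h
          · exact hkj h.symm
          · exact hmem h
        simp [hkt, this, hmem]

lemma pv_arr_eq (l : List Int) (hpre : ∀ x ∈ l, 0 ≤ x) :
    (PySem.Dict.counter l).items.foldl (fun a kc => pySetAt a kc.1 kc.2)
        (List.replicate (pvMxA l + 1).toNat 0)
      = (List.range (pvMxA l + 1).toNat).map (fun k : Nat => (l.count (k : Int) : Int)) := by
  rw [PySem.Dict.items_counter, List.foldl_map]
  have hnn : 0 ≤ pvMxA l := pvMxA_nonneg l hpre
  have hkey : ∀ k ∈ PySem.Set.ofList l,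
      0 ≤ k ∧ k < ((List.replicate (pvMxA l + 1).toNat (0 : Int)).length : Int) := by
    intro k hk
    have hkl : k ∈ l := by rwa [PySem.Set.mem_ofList] at hk
    have := pvMxA_isMax l k hkl
    refine ⟨hpre k hkl, ?_⟩
    simp only [List.length_replicate]
    omega
  apply List.ext_getElem?
  intro j
  rw [pv_getElem?_foldl_setAt (fun k => (l.count k : Int)) (PySem.Set.ofList l) _ j hkey]
  by_cases hjN : j < (pvMxA l + 1).toNat
  · have h2 : ((List.range (pvMxA l + 1).toNat).map (fun k : Nat => (l.count (k : Int) : Int)))[j]?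
        = some (l.count (j : Int) : Int) := by
      rw [List.getElem?_map]
      have : (List.range (pvMxA l + 1).toNat)[j]? = some j := by
        simp [hjN]
      rw [this, Option.map_some]
    rw [h2]
    by_cases hmem : (j : Int) ∈ PySem.Set.ofList l
    · rw [if_pos hmem]
    · have hnot : (j : Int) ∉ l := by rwa [PySem.Set.mem_ofList] at hmem
      rw [if_neg hmem, List.getElem?_replicate_of_lt hjN, List.count_eq_zero.mpr hnot]
      simp
  · have hmem : ¬ ((j : Int) ∈ PySem.Set.ofList l) := by
      intro hk
      have := hkey _ hk
      simp only [List.length_replicate] at this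
      omega
    have h1 : (List.replicate (pvMxA l + 1).toNat (0 : Int))[j]? = none := by
      rw [List.getElem?_eq_none_iff]
      simpa using Nat.le_of_not_lt hjN
    have h2 : ((List.range (pvMxA l + 1).toNat).map (fun k : Nat => (l.count (k : Int) : Int)))[j]? = none := by
      rw [List.getElem?_eq_none_iff]
      simpa using Nat.le_of_not_lt hjN
    rw [if_neg hmem, h1, h2]

-- ---------- A-side: reversed accumulate of reversed = suffix sums ----------

lemma pv_accum_append (x : Int) :
    ∀ (ys : List Int) (s : Int),
      pvAccum s (ys ++ [x]) = pvAccum s ys ++ [s + ys.sum + x] := by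
  intro ys
  induction ys with
  | nil => intro s; simp [pvAccum]
  | cons y ys ih =>
    intro s
    simp only [List.cons_append, pvAccum, ih (s + y), List.sum_cons, List.cons_append]
    have : s + y + ys.sum + x = s + (y + ys.sum) + x := by ring
    rw [this]

lemma pv_suffAcc_cons (x : Int) (xs : List Int) :
    (pvAccum 0 (x :: xs).reverse).reverse = (x + xs.sum) :: (pvAccum 0 xs.reverse).reverse := by
  rw [List.reverse_cons, pv_accum_append, List.reverse_append]
  simp only [List.reverse_cons, List.reverse_nil, List.nil_append, List.singleton_append,
    List.sum_reverse, zero_add]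
  rw [show xs.sum + x = x + xs.sum by ring]

-- suffix sums of the exact-count window [c, c+n) are the ≥-counts (given the upper bound)
lemma pv_suffAcc_counts (l : List Int) :
    ∀ (n : Nat) (c : Int), (∀ x ∈ l, x < c + (n : Int)) →
      (pvAccum 0 ((List.range n).map (fun k : Nat => (l.count (c + (k : Int)) : Int))).reverse).reverse
        = (List.range n).map (fun k : Nat => (l.countP (fun x => decide (c + (k : Int) ≤ x)) : Int)) := by
  intro n
  induction n with
  | zero => intro c _; simp [pvAccum]
  | succ n ih =>
    intro c hub
    rw [List.range_succ_eq_map]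
    simp only [List.map_cons, List.map_map]
    have hmap : (List.range n).map ((fun k : Nat => (l.count (c + (k : Int)) : Int)) ∘ Nat.succ)
        = (List.range n).map (fun k : Nat => (l.count ((c + 1) + (k : Int)) : Int)) := by
      apply List.map_congr_left; intro k _
      simp only [Function.comp]; congr 1; push_cast; ring_nf
    have hmap2 : (List.range n).map ((fun k : Nat => (l.countP (fun x => decide (c + (k : Int) ≤ x)) : Int)) ∘ Nat.succ)
        = (List.range n).map (fun k : Nat => (l.countP (fun x => decide ((c + 1) + (k : Int) ≤ x)) : Int)) := by
      apply List.map_congr_left; intro k _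
      simp only [Function.comp]; congr 2
      funext x; congr 1; push_cast; ring_nf
    rw [hmap, pv_suffAcc_cons, ih (c + 1) (by intro x hx; have := hub x hx; push_cast at this ⊢; omega),
      hmap2]
    congr 1
    · have e0 : c + ((0 : Nat) : Int) = c := by push_cast; ring
      rw [e0, pv_sum_counts l n (c + 1)]
      have h1 : l.countP (fun x => decide (c ≤ x))
          = l.countP (fun x => decide (c ≤ x) && decide (x < c + 1 + (n : Int))) := by
        rw [pv_countP_drop_ub l c (c + 1 + (n : Int))
          (by intro x hx; have := hub x hx; push_cast at this; omega)]
      rw [h1, pv_countP_split l c (c + 1 + (n : Int)) (by omega)]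
      push_cast
      ring

lemma A_eq_canon (l : List Int) (hpre : ∀ x ∈ l, 0 ≤ x) :
    process_vote_counts l = pvCanon l := by
  have hA : process_vote_counts l
      = PySem.List.enumerate
          ((pvAccum 0 (((PySem.Dict.counter l).items.foldl (fun a kc => pySetAt a kc.1 kc.2)
              (List.replicate (pvMxA l + 1).toNat 0)).reverse)).reverse) 1 := rfl
  rw [hA, pv_arr_eq l hpre]
  have hub : ∀ x ∈ l, x < (0 : Int) + ((((pvMxA l + 1).toNat : Nat)) : Int) := by
    intro x hx
    have h1 := pvMxA_isMax l x hx
    have h2 := pvMxA_nonneg l hpre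
    omega
  have hmap0 : (List.range (pvMxA l + 1).toNat).map (fun k : Nat => (l.count (k : Int) : Int))
      = (List.range (pvMxA l + 1).toNat).map (fun k : Nat => (l.count ((0 : Int) + (k : Int)) : Int)) := by
    apply List.map_congr_left; intro k _; norm_num
  rw [hmap0, pv_suffAcc_counts l (pvMxA l + 1).toNat 0 hub]
  -- enumerate over a mapped range
  have henum : ∀ (g : Nat → Int) (n : Nat) (s : Int),
      PySem.List.enumerate ((List.range n).map g) s
        = (List.range n).map (fun k : Nat => (s + (k : Int), g k)) := by
    intro g n
    induction n generalizing g with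
    | zero => intro s; simp
    | succ n ih =>
      intro s
      rw [List.range_succ_eq_map]
      simp only [List.map_cons, List.map_map, PySem.List.enumerate]
      rw [ih (g ∘ Nat.succ) (s + 1)]
      congr 1
      · norm_num
      · apply List.map_congr_left; intro k _
        simp only [Function.comp]
        congr 1
        push_cast
        ring
  rw [henum]
  unfold pvCanon
  apply List.map_congr_left
  intro k _
  simp only [zero_add]
  rw [show (1 : Int) + (k : Int) = (k : Int) + 1 by ring]

-- ---------- B-side ----------

lemma pv_dropLt_eq_filter (j : Int) :
    ∀ (t : List Int), t.Pairwise (· ≤ ·) → pvDropLt j t = t.filter (fun x => decide (j ≤ x)) := by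
  intro t
  induction t with
  | nil => intro _; rfl
  | cons x xs ih =>
    intro hp
    have hp' := hp.of_cons
    have hall := (List.pairwise_cons.mp hp).1
    unfold pvDropLt
    by_cases hx : x < j
    · have : ¬ (j ≤ x) := by omega
      simp only [if_pos hx, List.filter_cons, this, decide_false, ih hp']
      simp [this]
    · have hjx : j ≤ x := by omega
      simp only [if_neg hx, List.filter_cons, hjx, decide_true, if_pos]
      have hfs : xs.filter (fun y => decide (j ≤ y)) = xs := by
        apply List.filter_eq_self.mpr
        intro y hy
        have := hall y hy
        simp; omega
      simp [hfs]

lemma pv_B_loop (l : List Int) :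
    ∀ (n : Nat) (a : Int) (t : List Int) (acc : List (Int × Int)),
      t.Pairwise (· ≤ ·) →
      (∀ (j : Int), a ≤ j →
        t.countP (fun x => decide (j ≤ x)) = l.countP (fun x => decide (j ≤ x))
        ∧ pvDropLt j t = t.filter (fun x => decide (j ≤ x))) →
      ((PySem.List.pyRange a (a + (n : Int)) 1).foldl
          (fun (st : List Int × List (Int × Int)) j =>
            let t' := pvDropLt j st.1
            (t', st.2 ++ [(j + 1, (t'.length : Int))]))
          (t, acc)).2
        = acc ++ (List.range n).map
            (fun k : Nat => (a + (k : Int) + 1, (l.countP (fun x => decide (a + (k : Int) ≤ x)) : Int))) := by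
  intro n
  induction n with
  | zero =>
    intro a t acc _ _
    rw [show a + ((0 : Nat) : Int) = a by norm_num, PySem.List.pyRange_one_eq_nil (le_refl a)]
    simp
  | succ n ih =>
    intro a t acc hp hinv
    rw [PySem.List.pyRange_one_cons (by push_cast; omega)]
    rw [List.foldl_cons]
    have hfil := (hinv a (le_refl a)).2
    have hcnt := (hinv a (le_refl a)).1
    set t' := pvDropLt a t with ht'
    have ht'f : t' = t.filter (fun x => decide (a ≤ x)) := hfil
    have hp' : t'.Pairwise (· ≤ ·) := ht'f ▸ hp.filter _
    have hlen : (t'.length : Int) = (l.countP (fun x => decide (a ≤ x)) : Int) := by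
      rw [ht'f, ← List.countP_eq_length_filter, hcnt]
    have hinv' : ∀ (j : Int), a + 1 ≤ j →
        t'.countP (fun x => decide (j ≤ x)) = l.countP (fun x => decide (j ≤ x))
        ∧ pvDropLt j t' = t'.filter (fun x => decide (j ≤ x)) := by
      intro j hj
      refine ⟨?_, pv_dropLt_eq_filter j t' hp'⟩
      rw [ht'f, List.countP_filter]
      rw [← (hinv j (by omega)).1]
      apply List.countP_congr
      intro x _
      simp only [Bool.and_eq_true, decide_eq_true_eq]
      constructor
      · rintro ⟨h1, _⟩; exact h1
      · intro h1; exact ⟨h1, by omega⟩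
    have hstep := ih (a + 1) t' (acc ++ [(a + 1, (t'.length : Int))]) hp' hinv'
    push_cast
    rw [show a + ((n : Int) + 1) = (a + 1) + (n : Int) by ring]
    rw [hstep, List.range_succ_eq_map, List.map_cons, List.map_map, List.append_assoc,
      List.singleton_append]
    congr 2
    · rw [hlen]
      norm_num
    · apply List.map_congr_left
      intro k _
      simp only [Function.comp_apply]
      push_cast
      ring_nf

lemma pv_le_getLast :
    ∀ (s : List Int), s.Pairwise (· ≤ ·) → ∀ x ∈ s, ∀ (h : s ≠ []), x ≤ s.getLast h := by
  intro s
  induction s with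
  | nil => intro _ x hx; simp at hx
  | cons y t ih =>
    intro hp x hx h
    cases t with
    | nil =>
      simp at hx
      simp [hx, List.getLast]
    | cons z t' =>
      have htne : z :: t' ≠ [] := by simp
      rw [List.getLast_cons htne]
      rcases List.mem_cons.mp hx with hxy | hxt
      · subst hxy
        have hlast : (z :: t').getLast htne ∈ z :: t' := List.getLast_mem htne
        exact (List.pairwise_cons.mp hp).1 _ hlast
      · exact ih (List.pairwise_cons.mp hp).2 x hxt htne

lemma pv_mxB_eq (l : List Int) :
    (match PySem.List.pyGet? (PySem.List.sorted l (fun x => x) false) (-1) with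
      | some m => m
      | none => 0) = pvMxA l := by
  by_cases hl : l = []
  · subst hl
    have hs : PySem.List.sorted ([] : List Int) (fun x => x) false = [] :=
      (PySem.List.sorted_eq_nil_iff [] (fun x => x) false).mpr rfl
    rw [hs]
    simp [PySem.List.pyGet?, PySem.List.pyIdx?, pvMxA, PySem.List.max?]
  · have hsne : PySem.List.sorted l (fun x => x) false ≠ [] := by
      intro h
      exact hl ((PySem.List.sorted_eq_nil_iff l (fun x => x) false).mp h)
    set s := PySem.List.sorted l (fun x => x) false with hs
    have hlen : 1 ≤ s.length := List.length_pos_iff.mpr hsne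
    have hget : PySem.List.pyGet? s (-1) = s.getLast? := by
      simp only [PySem.List.pyGet?, PySem.List.pyIdx?, List.getLast?_eq_getElem?]
      have h1 : ¬ ((0 : Int) ≤ -1) := by omega
      have h2 : -(s.length : Int) ≤ -1 := by omega
      rw [if_neg h1, if_pos h2]
      simp
    rw [hget, List.getLast?_eq_some_getLast hsne]
    -- the last element of the sorted list is the (first) maximum
    have hperm := PySem.List.sorted_perm l (fun x => x) false
    have hpair := PySem.List.sorted_pairwise l (fun x => x)
    cases hm : PySem.List.max? l (fun x => x) with
    | none =>
      exact absurd ((PySem.List.max?_eq_none_iff l (fun x => x)).mp hm) hl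
    | some m =>
      have hml : m ∈ l := PySem.List.max?_mem hm
      have hms : m ∈ s := (hperm.mem_iff).mpr hml
      have h1 : m ≤ s.getLast hsne := pv_le_getLast s hpair m hms hsne
      have h2 : s.getLast hsne ≤ m := by
        have : s.getLast hsne ∈ l := (hperm.mem_iff).mp (List.getLast_mem hsne)
        exact PySem.List.max?_isMax hm _ this
      have : s.getLast hsne = m := le_antisymm h2 h1
      rw [this]
      unfold pvMxA
      rw [hm]

lemma B_eq_canon (l : List Int) (hpre : ∀ x ∈ l, 0 ≤ x) :
    process_vote_counts_alt l = pvCanon l := by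
  have hpair := PySem.List.sorted_pairwise l (fun x => x)
  have hperm := PySem.List.sorted_perm l (fun x => x) false
  have hnn := pvMxA_nonneg l hpre
  have hB : process_vote_counts_alt l
      = ((PySem.List.pyRange 0 ((match PySem.List.pyGet? (PySem.List.sorted l (fun x => x) false) (-1) with
            | some m => m
            | none => 0) + 1) 1).foldl
          (fun (st : List Int × List (Int × Int)) j =>
            let t' := pvDropLt j st.1
            (t', st.2 ++ [(j + 1, (t'.length : Int))]))
          (PySem.List.sorted l (fun x => x) false, [])).2 := rfl
  rw [hB, pv_mxB_eq l]
  have hinv : ∀ (j : Int), (0 : Int) ≤ j →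
      (PySem.List.sorted l (fun x => x) false).countP (fun x => decide (j ≤ x))
          = l.countP (fun x => decide (j ≤ x))
      ∧ pvDropLt j (PySem.List.sorted l (fun x => x) false)
          = (PySem.List.sorted l (fun x => x) false).filter (fun x => decide (j ≤ x)) := by
    intro j _
    exact ⟨hperm.countP_eq _, pv_dropLt_eq_filter j _ hpair⟩
  have hloop := pv_B_loop l (pvMxA l + 1).toNat 0 (PySem.List.sorted l (fun x => x) false) []
    hpair hinv
  have hn : (0 : Int) + (((pvMxA l + 1).toNat : Nat) : Int) = pvMxA l + 1 := by omega
  rw [hn] at hloop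
  rw [hloop, List.nil_append]
  unfold pvCanon
  apply List.map_congr_left
  intro k _
  simp only [zero_add]

-- ===== VERDICT (by name: the statement is the Claim_ definition above) =====
theorem process_vote_counts_spec : Claim_equal_process_vote_counts := by
  intro l _ hpre
  unfold Spec_process_vote_counts
  rw [A_eq_canon l hpre, B_eq_canon l hpre]
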